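-- pv_equiv track=rewrite | github.com/daniestevez/gr-satellites | python/bch15.py | compute_syndrome
-- ===== SOURCE A (Python) =====
-- exp_table = [8, 4, 2, 1, 12, 6, 3, 13, 10, 5, 14, 7, 15, 11, 9] # exp_table[k] = a^k
--
-- def compute_syndrome(p,j):
--     s = 0
--     n = 15
--     for k in range(n-1,-1,-1):
--         if p & 1:
--             s ^= exp_table[(k * j) % len(exp_table)]
--         p >>= 1
--     return s
-- ===== SOURCE B (Python) =====
-- exp_table = [8, 4, 2, 1, 12, 6, 3, 13, 10, 5, 14, 7, 15, 11, 9]  # exp_table[k] = a^k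
-- log_table = {v: k for k, v in enumerate(exp_table)}  # discrete log, inverse of exp_table
--
--
-- def gfmul(a, b):
--     """Multiply two GF(16) elements (in the exp_table representation)."""
--     if a == 0 or b == 0:
--         return 0
--     return exp_table[(log_table[a] + log_table[b]) % 15]
--
--
-- def compute_syndrome(p, j):
--     # Horner's rule: evaluate the codeword polynomial at x = a^j in GF(16).
--     x = exp_table[j % 15]
--     s = 0
--     for i in range(15):
--         s = gfmul(s, x)
--         if (p >> i) & 1:
--             s ^= 8  # exp_table[0] = 8 is the multiplicative identity
--     return s
-- ===== Notes on version B (the rewrite author's own statement) =====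
-- stated objective: alternative
-- what changed: Replaces per-term discrete-log table lookups exp_table[(k*j)%15] for each set bit by Horner's-rule evaluation of the codeword polynomial at x = a^j in GF(16), multiplying one accumulator by x each step via a log-table-based gfmul and XORing in the identity element 8 for set bits.
import Mathlib
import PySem

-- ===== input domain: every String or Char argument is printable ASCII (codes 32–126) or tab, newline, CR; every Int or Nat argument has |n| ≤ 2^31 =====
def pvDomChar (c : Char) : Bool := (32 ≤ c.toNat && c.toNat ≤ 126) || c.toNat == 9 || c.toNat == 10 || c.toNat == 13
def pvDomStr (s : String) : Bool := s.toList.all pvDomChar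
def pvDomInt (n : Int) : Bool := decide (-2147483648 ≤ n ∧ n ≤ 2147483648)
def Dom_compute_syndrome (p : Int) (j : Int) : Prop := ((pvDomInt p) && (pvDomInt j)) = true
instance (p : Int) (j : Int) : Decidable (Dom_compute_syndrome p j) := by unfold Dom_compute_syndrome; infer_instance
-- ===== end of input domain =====

-- B replaces A's per-term exp_table[(k*j)%15] lookups by Horner's-rule evaluation of the
-- codeword polynomial at x = a^j in GF(16) (objective: alternative algorithm, same cost).

-- ===== PORT A =====
-- exp_table = [8, 4, 2, 1, 12, 6, 3, 13, 10, 5, 14, 7, 15, 11, 9]   # exp_table[k] = a^k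
def pvExpTable : List Int := [8, 4, 2, 1, 12, 6, 3, 13, 10, 5, 14, 7, 15, 11, 9]

-- the loop body of A: state (s, p); `p & 1` is PySem.Int.band p 1, `s ^= …` is PySem.Int.bxor,
-- `p >>= 1` is floor division by 2 (Python-exact on negatives), len(exp_table) = 15.
def pvAStep (j : Int) (st : Int × Int) (k : Int) : Int × Int :=
  (if PySem.Int.band st.2 1 ≠ 0 then
     PySem.Int.bxor st.1 (PySem.List.pyGetD pvExpTable (PySem.Int.mod (k * j) 15) 0)
   else st.1,
   PySem.Int.floordiv st.2 2)

def compute_syndrome (p : Int) (j : Int) : Int :=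
  let n : Int := 15
  ((PySem.List.pyRange (n - 1) (-1) (-1)).foldl (pvAStep j) (0, p)).1

-- ===== PORT B =====
-- log_table = {v: k for k, v in enumerate(exp_table)}
def pvLogTable : PySem.Dict Int Int :=
  (PySem.List.enumerate pvExpTable).foldl (fun d kv => d.insert kv.2 kv.1) PySem.Dict.empty

-- gfmul(a, b); log_table[a] is a Dict lookup (every nonzero argument that arises is a key,
-- so the total getD form is exact).
def pvGfmul (a : Int) (b : Int) : Int :=
  if a = 0 ∨ b = 0 then 0
  else PySem.List.pyGetD pvExpTable
        (PySem.Int.mod (pvLogTable.getD a 0 + pvLogTable.getD b 0) 15) 0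

-- the loop body of B: `(p >> i) & 1` — Python `p >> i` is floor division by 2^i (exact on negatives).
def pvBStep (p : Int) (x : Int) (s : Int) (i : Int) : Int :=
  let s' := pvGfmul s x
  if PySem.Int.band (PySem.Int.floordiv p (2 ^ i.toNat)) 1 ≠ 0 then PySem.Int.bxor s' 8 else s'

def compute_syndrome_alt (p : Int) (j : Int) : Int :=
  let x := PySem.List.pyGetD pvExpTable (PySem.Int.mod j 15) 0
  (PySem.List.pyRange 0 15 1).foldl (pvBStep p x) 0

-- ===== PRECONDITION & SPEC =====
def Spec_compute_syndrome (p : Int) (j : Int) (out : Int) : Prop := out = compute_syndrome_alt p j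
instance (p : Int) (j : Int) (out : Int) : Decidable (Spec_compute_syndrome p j out) := by unfold Spec_compute_syndrome; infer_instance

-- ===== CLAIM (what is proved, stated in full; the proofs are below) =====
def Claim_equal_compute_syndrome : Prop := ∀ (p : Int) (j : Int), Dom_compute_syndrome p j → Spec_compute_syndrome p j (compute_syndrome p j)

-- ===== LEMMAS AND PROOFS =====

-- exp_table[z % 15]
def pvE (z : Int) : Int := PySem.List.pyGetD pvExpTable (PySem.Int.mod z 15) 0

-- the low n bits of p, least significant first (Python floor semantics)
def pvBits : Int → Nat → List Int
  | _, 0 => []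
  | p, n + 1 => PySem.Int.mod p 2 :: pvBits (PySem.Int.floordiv p 2) n

-- A's accumulation over the bit list (bit at the head pairs with k = length of the tail)
def pvACore (j : Int) : List Int → Int → Int
  | [], s => s
  | c :: bs, s =>
      pvACore j bs (if c ≠ 0 then PySem.Int.bxor s (pvE ((bs.length : Int) * j)) else s)

-- B's Horner accumulation over the bit list
def pvHCore (x : Int) : List Int → Int → Int
  | [], s => s
  | c :: bs, s =>
      pvHCore x bs (if c ≠ 0 then PySem.Int.bxor (pvGfmul s x) 8 else pvGfmul s x)

theorem pvBits_length (n : Nat) : ∀ p, (pvBits p n).length = n := by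
  induction n with
  | zero => intro p; rfl
  | succ n ih => intro p; simp [pvBits, ih]

theorem pvBits_binary (n : Nat) : ∀ p, ∀ b ∈ pvBits p n, b = 0 ∨ b = 1 := by
  induction n with
  | zero => intro p b hb; simp [pvBits] at hb
  | succ n ih =>
    intro p b hb
    simp only [pvBits, List.mem_cons] at hb
    rcases hb with h | h
    · subst h; exact PySem.Int.mod_two_eq p
    · exact ih _ b h

theorem foldA (j : Int) (n : Nat) : ∀ p s : Int,
    ((PySem.List.pyRange ((n : Int) - 1) (-1) (-1)).foldl (pvAStep j) (s, p)).1
      = pvACore j (pvBits p n) s := by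
  induction n with
  | zero =>
    intro p s
    rw [PySem.List.pyRange_neg_one_eq_nil (by norm_num)]
    rfl
  | succ n ih =>
    intro p s
    have hc : ((n + 1 : Nat) : Int) - 1 = (n : Int) := by push_cast; ring
    rw [hc, PySem.List.pyRange_neg_one_cons (by omega)]
    show ((PySem.List.pyRange ((n : Int) - 1) (-1) (-1)).foldl (pvAStep j)
            (pvAStep j (s, p) (n : Int))).1 = _
    rw [show pvAStep j (s, p) (n : Int)
          = ((if PySem.Int.band p 1 ≠ 0 then
                PySem.Int.bxor s (PySem.List.pyGetD pvExpTable (PySem.Int.mod ((n : Int) * j) 15) 0)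
              else s), PySem.Int.floordiv p 2) from rfl]
    rw [ih]
    simp only [pvBits, pvACore, pvBits_length, pvE, PySem.Int.band_one]

theorem foldB (x : Int) (n : Nat) : ∀ p s : Int,
    ((List.range n).foldl (fun s (i : Nat) => pvBStep p x s (i : Int)) s)
      = pvHCore x (pvBits p n) s := by
  induction n with
  | zero => intro p s; rfl
  | succ n ih =>
    intro p s
    rw [List.range_succ_eq_map, List.foldl_cons, List.foldl_map]
    have hstep : ∀ (s : Int) (i : Nat),
        pvBStep p x s ((i + 1 : Nat) : Int) = pvBStep (PySem.Int.floordiv p 2) x s (i : Int) := by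
      intro s i
      have hdv : PySem.Int.floordiv p (2 ^ ((i + 1 : Nat) : Int).toNat)
          = PySem.Int.floordiv (PySem.Int.floordiv p 2) (2 ^ ((i : Nat) : Int).toNat) := by
        rw [PySem.Int.floordiv_eq_ediv_of_pos (by positivity),
            PySem.Int.floordiv_eq_ediv_of_pos (by norm_num),
            PySem.Int.floordiv_eq_ediv_of_pos (by positivity)]
        rw [Int.ediv_ediv_of_nonneg (by norm_num : (0:Int) ≤ 2)]
        congr 1
        simp [pow_succ, Int.toNat_natCast]
        ring
      simp only [pvBStep, hdv]
    have hfun : (fun (s : Int) (i : Nat) => pvBStep p x s ((i.succ : Nat) : Int))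
        = fun (s : Int) (i : Nat) => pvBStep (PySem.Int.floordiv p 2) x s (i : Int) := by
      funext s i
      exact hstep s i
    rw [hfun, ih]
    have h0 : pvBStep p x s ((0 : Nat) : Int)
        = (if PySem.Int.mod p 2 ≠ 0 then PySem.Int.bxor (pvGfmul s x) 8 else pvGfmul s x) := by
      simp only [pvBStep, PySem.Int.band_one]
      norm_num
    rw [h0]
    rfl

-- range facts
theorem pvGfmul_range (a b : Int) : 0 ≤ pvGfmul a b ∧ pvGfmul a b < 16 := by
  unfold pvGfmul
  split_ifs with h
  · norm_num
  · have hm : PySem.Int.mod (pvLogTable.getD a 0 + pvLogTable.getD b 0) 15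
        = (pvLogTable.getD a 0 + pvLogTable.getD b 0) % 15 :=
      PySem.Int.mod_eq_emod_of_pos (by norm_num)
    set z := pvLogTable.getD a 0 + pvLogTable.getD b 0 with hz
    have h0 : 0 ≤ z % 15 := Int.emod_nonneg z (by norm_num)
    have h15 : z % 15 < 15 := Int.emod_lt_of_pos z (by norm_num)
    rw [hm]
    interval_cases h : (z % 15) <;> decide

theorem pvBxor_nonneg (a b : Int) (ha : 0 ≤ a) (hb : 0 ≤ b) : 0 ≤ PySem.Int.bxor a b := by
  rw [PySem.Int.bxor_of_nonneg ha hb]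
  exact Int.natCast_nonneg _

theorem pvBxor_lt16 (a b : Int) (ha : 0 ≤ a) (ha' : a < 16) (hb : 0 ≤ b) (hb' : b < 16) :
    PySem.Int.bxor a b < 16 := by
  rw [PySem.Int.bxor_of_nonneg ha hb]
  have h1 : a.toNat < 2 ^ 4 := by omega
  have h2 : b.toNat < 2 ^ 4 := by omega
  have h := Nat.xor_lt_two_pow (x := a.toNat) (y := b.toNat) (n := 4) h1 h2
  exact_mod_cast h

theorem pvBxor_assoc (a b c : Int) (ha : 0 ≤ a) (hb : 0 ≤ b) (hc : 0 ≤ c) :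
    PySem.Int.bxor (PySem.Int.bxor a b) c = PySem.Int.bxor a (PySem.Int.bxor b c) := by
  rw [PySem.Int.bxor_of_nonneg ha hb, PySem.Int.bxor_of_nonneg (Int.natCast_nonneg _) hc,
      PySem.Int.bxor_of_nonneg hb hc, PySem.Int.bxor_of_nonneg ha (Int.natCast_nonneg _)]
  simp [Int.toNat_natCast, Nat.xor_assoc]

-- pvE depends only on z mod 15, has values in [1, 16)
theorem pvE_emod (z : Int) : pvE (z % 15) = pvE z := by
  unfold pvE
  rw [PySem.Int.mod_eq_emod_of_pos (by norm_num), PySem.Int.mod_eq_emod_of_pos (by norm_num),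
      Int.emod_emod_of_dvd z (by norm_num)]

theorem pvE_range (z : Int) : 0 ≤ pvE z ∧ pvE z < 16 := by
  unfold pvE
  rw [PySem.Int.mod_eq_emod_of_pos (by norm_num)]
  have h0 : 0 ≤ z % 15 := Int.emod_nonneg z (by norm_num)
  have h15 : z % 15 < 15 := Int.emod_lt_of_pos z (by norm_num)
  interval_cases h : (z % 15) <;> decide

-- accumulator behaviour of pvACore
theorem pvACore_acc (j : Int) : ∀ (bs : List Int) (s : Int), 0 ≤ s →
    pvACore j bs s = PySem.Int.bxor s (pvACore j bs 0) ∧ 0 ≤ pvACore j bs 0 := by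
  intro bs
  induction bs with
  | nil =>
    intro s hs
    constructor
    · simp [pvACore]
    · norm_num [pvACore]
  | cons c bs ih =>
    intro s hs
    by_cases hc : c ≠ 0
    · have he := pvE_range ((bs.length : Int) * j)
      have h1 := ih (PySem.Int.bxor s (pvE ((bs.length : Int) * j)))
        (pvBxor_nonneg _ _ hs he.1)
      have h2 := ih (PySem.Int.bxor 0 (pvE ((bs.length : Int) * j)))
        (pvBxor_nonneg _ _ (by norm_num) he.1)
      have h0e : PySem.Int.bxor 0 (pvE ((bs.length : Int) * j)) = pvE ((bs.length : Int) * j) := by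
        rw [PySem.Int.bxor_comm, PySem.Int.bxor_zero]
      simp only [pvACore, if_pos hc]
      rw [h1.1, h2.1, h0e]
      exact ⟨pvBxor_assoc s _ _ hs he.1 h2.2, pvBxor_nonneg _ _ he.1 h2.2⟩
    · simp only [pvACore, if_neg hc]
      exact ih s hs

-- finite GF(16) facts, discharged by kernel evaluation
theorem pvGfmul_id : ∀ s : Fin 16, pvGfmul (s : Int) 8 = (s : Int) := by decide

theorem pvGf_step0 : ∀ (s : Fin 16) (t u : Fin 15),
    pvGfmul (pvGfmul (s : Int) (pvE (t : Int))) (pvE (u : Int))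
      = pvGfmul (s : Int) (pvE ((u : Int) + (t : Int))) := by decide

theorem pvGf_step1 : ∀ (s : Fin 16) (t u : Fin 15),
    pvGfmul (PySem.Int.bxor (pvGfmul (s : Int) (pvE (t : Int))) 8) (pvE (u : Int))
      = PySem.Int.bxor (pvGfmul (s : Int) (pvE ((u : Int) + (t : Int)))) (pvE (u : Int)) := by
  decide

-- lift the finite facts to arbitrary integer exponents
theorem pvGf_step0' (s j m : Int) (hs0 : 0 ≤ s) (hs1 : s < 16) :
    pvGfmul (pvGfmul s (pvE j)) (pvE (m * j)) = pvGfmul s (pvE ((m + 1) * j)) := by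
  have ht0 : 0 ≤ j % 15 := Int.emod_nonneg j (by norm_num)
  have ht1 : j % 15 < 15 := Int.emod_lt_of_pos j (by norm_num)
  have hu0 : 0 ≤ (m * j) % 15 := Int.emod_nonneg _ (by norm_num)
  have hu1 : (m * j) % 15 < 15 := Int.emod_lt_of_pos _ (by norm_num)
  have h := pvGf_step0 ⟨s.toNat, by omega⟩ ⟨(j % 15).toNat, by omega⟩ ⟨((m * j) % 15).toNat, by omega⟩
  rw [Int.toNat_of_nonneg hs0, Int.toNat_of_nonneg ht0, Int.toNat_of_nonneg hu0] at h
  rw [pvE_emod j, pvE_emod (m * j)] at h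
  rw [h, ← pvE_emod ((m * j) % 15 + j % 15), ← pvE_emod ((m + 1) * j)]
  have harg : ((m * j) % 15 + j % 15) % 15 = ((m + 1) * j) % 15 := by
    have hmj : (m + 1) * j = m * j + j := by ring
    rw [hmj]; omega
  rw [harg]

theorem pvGf_step1' (s j m : Int) (hs0 : 0 ≤ s) (hs1 : s < 16) :
    pvGfmul (PySem.Int.bxor (pvGfmul s (pvE j)) 8) (pvE (m * j))
      = PySem.Int.bxor (pvGfmul s (pvE ((m + 1) * j))) (pvE (m * j)) := by
  have ht0 : 0 ≤ j % 15 := Int.emod_nonneg j (by norm_num)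
  have ht1 : j % 15 < 15 := Int.emod_lt_of_pos j (by norm_num)
  have hu0 : 0 ≤ (m * j) % 15 := Int.emod_nonneg _ (by norm_num)
  have hu1 : (m * j) % 15 < 15 := Int.emod_lt_of_pos _ (by norm_num)
  have h := pvGf_step1 ⟨s.toNat, by omega⟩ ⟨(j % 15).toNat, by omega⟩ ⟨((m * j) % 15).toNat, by omega⟩
  rw [Int.toNat_of_nonneg hs0, Int.toNat_of_nonneg ht0, Int.toNat_of_nonneg hu0] at h
  rw [pvE_emod j, pvE_emod (m * j)] at h
  rw [h, ← pvE_emod ((m * j) % 15 + j % 15), ← pvE_emod ((m + 1) * j)]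
  have harg : ((m * j) % 15 + j % 15) % 15 = ((m + 1) * j) % 15 := by
    have hmj : (m + 1) * j = m * j + j := by ring
    rw [hmj]; omega
  rw [harg]

-- the key Horner invariant
theorem pvKey (j : Int) : ∀ (bs : List Int) (s : Int),
    (∀ b ∈ bs, b = 0 ∨ b = 1) → 0 ≤ s → s < 16 →
    pvHCore (pvE j) bs s
      = PySem.Int.bxor (pvGfmul s (pvE ((bs.length : Int) * j))) (pvACore j bs 0) := by
  intro bs
  induction bs with
  | nil =>
    intro s hb hs0 hs1
    have h := pvGfmul_id ⟨s.toNat, by omega⟩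
    rw [Int.toNat_of_nonneg hs0] at h
    have he : pvE (0 : Int) = 8 := by decide
    simp only [pvHCore, pvACore, List.length_nil, Nat.cast_zero, zero_mul, he, h,
      PySem.Int.bxor_zero]
  | cons c bs ih =>
    intro s hb hs0 hs1
    have hbtail : ∀ b ∈ bs, b = 0 ∨ b = 1 := fun b h => hb b (List.mem_cons_of_mem _ h)
    have hx := pvE_range j
    have hgr := pvGfmul_range s (pvE j)
    have hlen : (((c :: bs) : List Int).length : Int) = (bs.length : Int) + 1 := by
      simp
    rcases hb c (List.mem_cons_self) with hc | hc
    · -- bit clear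
      subst hc
      simp only [pvHCore, pvACore, ne_eq, not_true_eq_false, if_false]
      rw [ih _ hbtail hgr.1 hgr.2, hlen, ← pvGf_step0' s j (bs.length : Int) hs0 hs1]
    · -- bit set
      subst hc
      have hs' : 0 ≤ PySem.Int.bxor (pvGfmul s (pvE j)) 8 :=
        pvBxor_nonneg _ _ hgr.1 (by norm_num)
      have hs'' : PySem.Int.bxor (pvGfmul s (pvE j)) 8 < 16 :=
        pvBxor_lt16 _ _ hgr.1 hgr.2 (by norm_num) (by norm_num)
      simp only [pvHCore, pvACore, ne_eq, one_ne_zero, not_false_eq_true, if_true]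
      rw [ih _ hbtail hs' hs'']
      have hstep := pvGf_step1' s j (bs.length : Int) hs0 hs1
      rw [hstep]
      have hAcc := pvACore_acc j bs (PySem.Int.bxor 0 (pvE ((bs.length : Int) * j)))
        (pvBxor_nonneg _ _ (by norm_num) (pvE_range _).1)
      rw [hAcc.1, hlen]
      have hg := pvGfmul_range s (pvE (((bs.length : Int) + 1) * j))
      have hA0 := (pvACore_acc j bs 0 (by norm_num)).2
      have he := pvE_range ((bs.length : Int) * j)
      have h0e : PySem.Int.bxor 0 (pvE ((bs.length : Int) * j)) = pvE ((bs.length : Int) * j) := by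
        rw [PySem.Int.bxor_comm, PySem.Int.bxor_zero]
      rw [h0e]
      exact pvBxor_assoc _ _ _ hg.1 he.1 hA0

-- ===== VERDICT (by name: the statement is the Claim_ definition above) =====
theorem compute_syndrome_spec : Claim_equal_compute_syndrome := by
  intro p j _
  unfold Spec_compute_syndrome
  unfold compute_syndrome compute_syndrome_alt
  have hA := foldA j 15 p 0
  have hRangeB : PySem.List.pyRange 0 15 1 = (List.range 15).map (fun i : Nat => (i : Int)) := by
    decide
  have hB := foldB (PySem.List.pyGetD pvExpTable (PySem.Int.mod j 15) 0) 15 p 0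
  have hx : PySem.List.pyGetD pvExpTable (PySem.Int.mod j 15) 0 = pvE j := rfl
  simp only []
  rw [show ((15 : Int) - 1) = ((15 : Nat) : Int) - 1 by norm_num] at *
  rw [hA, hRangeB, List.foldl_map, hB, hx]
  have hkey := pvKey j (pvBits p 15) 0 (pvBits_binary 15 p) (by norm_num) (by norm_num)
  rw [hkey, pvBits_length]
  have h0 : pvGfmul 0 (pvE ((15 : Nat) * j)) = 0 := by simp [pvGfmul]
  rw [show (((15 : Nat) : Int) * j) = ((15 : Nat) : Int) * j from rfl, h0,
      PySem.Int.bxor_comm, PySem.Int.bxor_zero]
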